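-- pv_equiv track=rewrite | github.com/huapsy/AI-XinQue-Agent | app/backend/app/session_context.py | _merge_summary_sections
-- ===== SOURCE A (Python) =====
-- def _dedupe_keep_order(items: list[str], limit: int = 3) -> list[str]:
--     seen: set[str] = set()
--     output: list[str] = []
--     for item in items:
--         normalized = item.strip()
--         if not normalized or normalized in seen:
--             continue
--         seen.add(normalized)
--         output.append(normalized)
--         if len(output) >= limit:
--             break
--     return output
--
-- def _merge_summary_sections(
--     persisted: dict[str, list[str]] | None,
--     computed: dict[str, list[str]],
-- ) -> dict[str, list[str]]:
--     merged: dict[str, list[str]] = {}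
--     persisted = persisted or {}
--     for key in ("primary_themes", "active_concerns", "attempted_methods", "open_loops"):
--         merged[key] = _dedupe_keep_order([
--             *(persisted.get(key) or []),
--             *(computed.get(key) or []),
--         ], limit=4)
--     return merged
-- ===== SOURCE B (Python) =====
-- def _dedupe_keep_order(items: list[str], limit: int = 3) -> list[str]:
--     # recursive nub: emit the head's stripped value, filter its duplicates
--     # out of the tail, recurse with one slot fewer
--     if limit <= 0 or not items:
--         return []
--     head = items[0].strip()
--     rest = items[1:]
--     if not head:
--         return _dedupe_keep_order(rest, limit)
--     return [head] + _dedupe_keep_order([x for x in rest if x.strip() != head], limit - 1)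
--
-- _KEYS = ("primary_themes", "active_concerns", "attempted_methods", "open_loops")
--
-- def _merge_summary_sections(persisted, computed):
--     p = persisted or {}
--     return {
--         key: _dedupe_keep_order((p.get(key) or []) + (computed.get(key) or []), limit=4)
--         for key in _KEYS
--     }
-- ===== Notes on version B (the rewrite author's own statement) =====
-- stated objective: alternative
-- what changed: The dedupe helper's seen-set/output-accumulator loop with an early break is replaced by a recursive nub: emit the head's stripped value, filter all its duplicates out of the remaining tail, and recurse with limit-1, so no seen set or output accumulator exists; the merge becomes a dict comprehension over the fixed key tuple.
import Mathlib
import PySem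

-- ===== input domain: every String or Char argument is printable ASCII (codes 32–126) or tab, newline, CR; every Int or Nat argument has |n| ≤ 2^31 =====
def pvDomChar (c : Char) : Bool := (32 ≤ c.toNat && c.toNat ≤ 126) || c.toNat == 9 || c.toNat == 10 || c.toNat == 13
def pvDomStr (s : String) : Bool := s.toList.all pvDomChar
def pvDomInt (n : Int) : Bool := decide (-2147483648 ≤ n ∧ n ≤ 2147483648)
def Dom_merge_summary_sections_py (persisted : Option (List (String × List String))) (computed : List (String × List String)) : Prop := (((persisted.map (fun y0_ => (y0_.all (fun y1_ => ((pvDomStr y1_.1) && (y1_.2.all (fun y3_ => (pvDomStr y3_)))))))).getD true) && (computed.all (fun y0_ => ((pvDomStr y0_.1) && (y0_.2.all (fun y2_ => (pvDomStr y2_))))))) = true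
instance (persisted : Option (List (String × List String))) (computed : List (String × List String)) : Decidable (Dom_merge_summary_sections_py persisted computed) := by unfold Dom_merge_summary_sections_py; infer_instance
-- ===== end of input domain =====

-- B replaces the seen-set/output-accumulator loop with an early break by a
-- recursive nub (emit the head's stripped value, filter its duplicates out of
-- the tail, recurse with limit-1); same results, different decomposition.

-- ===== PORT A =====
-- shared helper: `(d.get(key) or [])` on an association-list dict (first match)
def pvGetList (d : List (String × List String)) (k : String) : List String :=
  match d.find? (fun p => p.1 == k) with
  | some (_, v) => v
  | none => []

-- the `for item in items` loop of A's _dedupe_keep_order, with seen/output state and break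
def pvDedupeLoopA (limit : Int) : List String → PySem.Set String → List String → List String
  | [], _, output => output
  | item :: rest, seen, output =>
    let normalized := PySem.Str.strip item
    if normalized == "" || PySem.Set.contains seen normalized then
      pvDedupeLoopA limit rest seen output
    else
      let seen' := PySem.Set.add seen normalized
      let output' := output ++ [normalized]
      if limit ≤ (output'.length : Int) then output'
      else pvDedupeLoopA limit rest seen' output'

def pvDedupeKeepOrderA (items : List String) (limit : Int) : List String :=
  pvDedupeLoopA limit items PySem.Set.empty []

def merge_summary_sections_py (persisted : Option (List (String × List String))) (computed : List (String × List String)) : List (String × List String) :=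
  let p := persisted.getD []
  (["primary_themes", "active_concerns", "attempted_methods", "open_loops"].foldl
    (fun merged key =>
      PySem.Dict.insert merged key
        (pvDedupeKeepOrderA (pvGetList p key ++ pvGetList computed key) 4))
    PySem.Dict.empty).items

-- ===== PORT B =====
-- recursive nub: emit head's stripped value, filter its duplicates from the tail, recurse
def pvDedupeKeepOrderB : List String → Int → List String
  | items, limit =>
    if limit ≤ 0 then []
    else
      match items with
      | [] => []
      | x :: rest =>
        if PySem.Str.strip x == "" then pvDedupeKeepOrderB rest limit
        else PySem.Str.strip x ::
          pvDedupeKeepOrderB (rest.filter (fun y => PySem.Str.strip y != PySem.Str.strip x)) (limit - 1)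
termination_by items _ => items.length
decreasing_by
  · simp
  · simpa using Nat.lt_succ_of_le (List.length_filter_le _ _)

def merge_summary_sections_py_alt (persisted : Option (List (String × List String))) (computed : List (String × List String)) : List (String × List String) :=
  let p := persisted.getD []
  ["primary_themes", "active_concerns", "attempted_methods", "open_loops"].map
    (fun key => (key, pvDedupeKeepOrderB (pvGetList p key ++ pvGetList computed key) 4))

-- ===== PRECONDITION & SPEC =====
def Spec_merge_summary_sections_py (persisted : Option (List (String × List String))) (computed : List (String × List String)) (out : List (String × List String)) : Prop := out = merge_summary_sections_py_alt persisted computed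
instance (persisted : Option (List (String × List String))) (computed : List (String × List String)) (out : List (String × List String)) : Decidable (Spec_merge_summary_sections_py persisted computed out) := by unfold Spec_merge_summary_sections_py; infer_instance

-- ===== CLAIM (what is proved, stated in full; the proofs are below) =====
def Claim_equal_merge_summary_sections_py : Prop := ∀ (persisted : Option (List (String × List String))) (computed : List (String × List String)), Dom_merge_summary_sections_py persisted computed → Spec_merge_summary_sections_py persisted computed (merge_summary_sections_py persisted computed)

-- ===== LEMMAS AND PROOFS =====
-- the ordered-unique tail of xs relative to an already-seen set (bridge between the two dedup styles)
def pvUniqFrom (seen : PySem.Set String) : List String → List String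
  | [] => []
  | item :: rest =>
    let n := PySem.Str.strip item
    if n == "" || PySem.Set.contains seen n then pvUniqFrom seen rest
    else n :: pvUniqFrom (PySem.Set.add seen n) rest

lemma pvLoopA_eq_take (xs : List String) : ∀ (limit : Int) (seen : PySem.Set String)
    (output : List String), (output.length : Int) < limit →
    pvDedupeLoopA limit xs seen output = output ++ (pvUniqFrom seen xs).take (limit.toNat - output.length) := by
  induction xs with
  | nil => intro limit seen output _; simp [pvDedupeLoopA, pvUniqFrom]
  | cons item rest ih =>
    intro limit seen output hlen
    simp only [pvDedupeLoopA, pvUniqFrom]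
    by_cases hskip : (PySem.Str.strip item == "" || PySem.Set.contains seen (PySem.Str.strip item)) = true
    · simp only [hskip, if_true]; exact ih limit seen output hlen
    · simp only [hskip, Bool.false_eq_true, if_false]
      have hk : limit.toNat - output.length = (limit.toNat - (output.length + 1)) + 1 := by omega
      rw [hk, List.take_succ_cons]
      by_cases hstop : limit ≤ ((output ++ [PySem.Str.strip item]).length : Int)
      · simp only [hstop, if_true]
        have : limit.toNat - (output.length + 1) = 0 := by
          simp at hstop; omega
        simp [this]
      · simp only [hstop, if_false]
        rw [ih limit _ (output ++ [PySem.Str.strip item]) (by simpa using lt_of_not_ge hstop)]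
        simp [List.append_assoc]

-- contains on an add is contains-or-equal
lemma pvContainsAdd (s : PySem.Set String) (v a : String) :
    PySem.Set.contains (PySem.Set.add s v) a = (PySem.Set.contains s a || a == v) := by
  rw [Bool.eq_iff_iff]
  simp only [Bool.or_eq_true, beq_iff_eq, PySem.Set.contains_iff, PySem.Set.mem_add]

-- pvUniqFrom depends on the seen set only through its membership test
lemma pvUniqFrom_congr (xs : List String) : ∀ (s t : PySem.Set String),
    (∀ a, PySem.Set.contains s a = PySem.Set.contains t a) → pvUniqFrom s xs = pvUniqFrom t xs := by
  induction xs with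
  | nil => intro s t _; rfl
  | cons item rest ih =>
    intro s t h
    simp only [pvUniqFrom, h]
    split
    · exact ih _ _ h
    · exact congrArg _ (ih _ _ (fun a => by simp only [pvContainsAdd, h a]))

-- adding v to the seen set is the same as filtering v's occurrences out of the tail
lemma pvUniqFrom_add_eq_filter (v : String) (xs : List String) : ∀ (seen : PySem.Set String),
    pvUniqFrom (PySem.Set.add seen v) xs = pvUniqFrom seen (xs.filter (fun y => PySem.Str.strip y != v)) := by
  induction xs with
  | nil => intro seen; rfl
  | cons item rest ih =>
    intro seen
    simp only [List.filter_cons]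
    by_cases heq : PySem.Str.strip item = v
    · have hb : (PySem.Str.strip item != v) = false := by simp [heq]
      have hc : (PySem.Str.strip item == "" || PySem.Set.contains (PySem.Set.add seen v) (PySem.Str.strip item)) = true := by
        simp [heq]
      simp only [hb, Bool.false_eq_true, if_false, pvUniqFrom, hc, if_true]
      exact ih seen
    · have hb : (PySem.Str.strip item != v) = true := by simp [heq]
      have hc : PySem.Set.contains (PySem.Set.add seen v) (PySem.Str.strip item)
          = PySem.Set.contains seen (PySem.Str.strip item) := by
        simp [heq]
      simp only [hb, if_true, pvUniqFrom, hc]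
      split
      · exact ih seen
      · refine congrArg _ ?_
        rw [← ih (PySem.Set.add seen (PySem.Str.strip item))]
        exact pvUniqFrom_congr rest _ _ (fun a => by
          simp only [pvContainsAdd]
          cases PySem.Set.contains seen a <;> cases a == v <;> simp)

-- B computes take limit of the ordered-unique sequence
lemma pvDedupeB_eq_take (n : Nat) : ∀ (xs : List String), xs.length ≤ n → ∀ (limit : Int),
    pvDedupeKeepOrderB xs limit = (pvUniqFrom PySem.Set.empty xs).take limit.toNat := by
  induction n with
  | zero =>
    intro xs hxs limit
    have : xs = [] := List.eq_nil_of_length_eq_zero (Nat.le_zero.mp hxs)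
    subst this
    simp [pvDedupeKeepOrderB, pvUniqFrom]
  | succ n ih =>
    intro xs hxs limit
    rw [pvDedupeKeepOrderB.eq_def]
    by_cases hlim : limit ≤ 0
    · simp [hlim, Int.toNat_of_nonpos hlim]
    · simp only [hlim, if_false]
      match xs, hxs with
      | [], _ => simp [pvUniqFrom]
      | x :: rest, hxs =>
        simp only [pvUniqFrom]
        have hempty : PySem.Set.contains PySem.Set.empty (PySem.Str.strip x) = false := by
          simp [PySem.Set.empty, PySem.Set.contains]
        by_cases hz : (PySem.Str.strip x == "") = true
        · simp only [hz, Bool.true_or, if_true]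
          exact ih rest (by simpa using Nat.succ_le_succ_iff.mp hxs) limit
        · simp only [hz, hempty, Bool.or_self, Bool.false_eq_true, if_false]
          have hpos : 0 < limit.toNat := by omega
          have htake : limit.toNat = (limit - 1).toNat + 1 := by omega
          rw [htake, List.take_succ_cons]
          congr 1
          rw [ih (rest.filter (fun y => PySem.Str.strip y != PySem.Str.strip x))
              (le_trans (List.length_filter_le _ _) (by simpa using Nat.succ_le_succ_iff.mp hxs)) (limit - 1)]
          rw [← pvUniqFrom_add_eq_filter]

lemma pvDedupe_eq (items : List String) : pvDedupeKeepOrderA items 4 = pvDedupeKeepOrderB items 4 := by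
  unfold pvDedupeKeepOrderA
  rw [pvLoopA_eq_take items 4 PySem.Set.empty [] (by decide),
      pvDedupeB_eq_take items.length items (le_refl _) 4]
  simp

-- ===== VERDICT (by name: the statement is the Claim_ definition above) =====
theorem merge_summary_sections_py_spec : Claim_equal_merge_summary_sections_py := by
  intro persisted computed _
  unfold Spec_merge_summary_sections_py merge_summary_sections_py merge_summary_sections_py_alt
  simp only [List.foldl, List.map, pvDedupe_eq]
  rfl
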